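-- pv_equiv track=rewrite | github.com/matttang27/GOPSsolver | ai/common.py | list_cards
-- ===== SOURCE A (Python) =====
-- from typing import List, Tuple
--
-- def list_cards(mask: int) -> List[int]:
--     cards = []
--     while mask:
--         lsb = mask & -mask
--         idx = lsb.bit_length() - 1
--         cards.append(idx + 1)
--         mask &= mask - 1
--     return cards
-- ===== SOURCE B (Python) =====
-- def list_cards(mask: int):
--     n = mask.bit_length()
--     return [i + 1 for i in range(n) if mask >> i & 1]
-- ===== Notes on version B (the rewrite author's own statement) =====
-- stated objective: idiomatic
-- what changed: B replaces A's lowest-set-bit isolate-and-clear loop (lsb = mask & -mask; mask &= mask-1) with a single list comprehension that tests every bit position 0..bit_length-1 with mask >> i & 1.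
import Mathlib
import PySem

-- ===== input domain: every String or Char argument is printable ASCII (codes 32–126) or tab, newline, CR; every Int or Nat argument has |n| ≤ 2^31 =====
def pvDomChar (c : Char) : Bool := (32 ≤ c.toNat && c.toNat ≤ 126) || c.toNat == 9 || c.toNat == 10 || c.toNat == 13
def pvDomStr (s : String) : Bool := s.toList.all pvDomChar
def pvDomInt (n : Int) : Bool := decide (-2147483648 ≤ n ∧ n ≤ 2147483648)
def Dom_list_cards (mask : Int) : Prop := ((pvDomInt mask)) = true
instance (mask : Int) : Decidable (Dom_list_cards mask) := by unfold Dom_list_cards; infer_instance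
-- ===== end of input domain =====

-- B extracts the set-bit positions with one comprehension over all bit positions
-- instead of A's isolate-lowest-set-bit-and-clear loop; same values, idiomatic form.

-- hand port of Python's int.bit_length on the absolute value (exact for every int)
def pyBitLen (n : Nat) : Nat :=
  if h : n = 0 then 0 else pyBitLen (n / 2) + 1
decreasing_by exact Nat.div_lt_self (Nat.pos_of_ne_zero h) (by omega)

-- termination fact for port A's loop: clearing the lowest set bit decreases a positive mask
theorem land_pred_toNat_lt (mask : Int) (h : 0 < mask) :
    (Int.land mask (mask - 1)).toNat < mask.toNat := by
  cases mask with
  | negSucc k => exact absurd (h.trans (Int.negSucc_lt_zero k)) (lt_irrefl 0)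
  | ofNat n =>
    obtain ⟨k, rfl⟩ : ∃ k, n = k + 1 := by
      refine ⟨n - 1, ?_⟩
      have h' : (0 : Int) < (n : Int) := h
      have : 0 < n := by exact_mod_cast h'
      omega
    have h1 : (Int.ofNat (k + 1)) - 1 = Int.ofNat k := by
      simp only [Int.ofNat_eq_natCast]; omega
    rw [h1]
    show ((k + 1) &&& k) < (k + 1)
    exact Nat.lt_of_le_of_lt Nat.and_le_right (by omega)

-- ===== PORT A =====
def list_cards (mask : Int) : List Int :=
  if h : 0 < mask then
    let lsb := Int.land mask (-mask)
    let idx : Int := (pyBitLen lsb.natAbs : Int) - 1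
    (idx + 1) :: list_cards (Int.land mask (mask - 1))
  else []
termination_by mask.toNat
decreasing_by exact land_pred_toNat_lt mask h

-- ===== PORT B =====
def list_cards_alt (mask : Int) : List Int :=
  (List.range (pyBitLen mask.natAbs)).filterMap
    (fun (i : Nat) => if Int.land (mask >>> i) 1 ≠ 0 then some ((i : Int) + 1) else none)

-- ===== PRECONDITION & SPEC =====
-- Pre_ excludes negative masks: there Python A's loop never terminates (mask stays
-- nonzero forever), so A returns no value at all.
def Pre_list_cards (mask : Int) : Prop := 0 ≤ mask
instance (mask : Int) : Decidable (Pre_list_cards mask) := by unfold Pre_list_cards; infer_instance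
def pvWitness_list_cards : Int := (44)
def Spec_list_cards (mask : Int) (out : List Int) : Prop := out = list_cards_alt mask
instance (mask : Int) (out : List Int) : Decidable (Spec_list_cards mask out) := by unfold Spec_list_cards; infer_instance

-- ===== CLAIM (what is proved, stated in full; the proofs are below) =====
def Claim_equal_list_cards : Prop := ∀ (mask : Int), Dom_list_cards mask → Pre_list_cards mask → Spec_list_cards mask (list_cards mask)

-- ===== LEMMAS AND PROOFS =====

-- Nat images of the two ports
def natA (m : Nat) : List Int :=
  if h : m = 0 then []
  else (pyBitLen (Nat.ldiff m (m - 1)) : Int) :: natA (m &&& (m - 1))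
decreasing_by exact Nat.lt_of_le_of_lt Nat.and_le_right (by omega)

def natB (m : Nat) : List Int :=
  (List.range (pyBitLen m)).filterMap
    (fun i => if m.testBit i then some ((i : Int) + 1) else none)

theorem tb0_even (m : Nat) : Nat.testBit (2 * m) 0 = false := by
  simp [Nat.testBit_zero, Nat.mul_mod_right]
theorem tb0_odd (m : Nat) : Nat.testBit (2 * m + 1) 0 = true := by
  simp [Nat.testBit_zero]
theorem tbs_even (m i : Nat) : Nat.testBit (2 * m) (i + 1) = Nat.testBit m i := by
  rw [Nat.testBit_succ]; congr 1; omega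
theorem tbs_odd (m i : Nat) : Nat.testBit (2 * m + 1) (i + 1) = Nat.testBit m i := by
  rw [Nat.testBit_succ]; congr 1; omega

theorem pyBitLen_even (m : Nat) (h : m ≠ 0) : pyBitLen (2 * m) = pyBitLen m + 1 := by
  rw [pyBitLen, dif_neg (by omega : ¬ 2 * m = 0)]
  have h2 : 2 * m / 2 = m := by omega
  rw [h2]
theorem pyBitLen_odd (m : Nat) : pyBitLen (2 * m + 1) = pyBitLen m + 1 := by
  rw [pyBitLen, dif_neg (by omega : ¬ 2 * m + 1 = 0)]
  have h2 : (2 * m + 1) / 2 = m := by omega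
  rw [h2]

theorem pyBitLen_zero : pyBitLen 0 = 0 := by rw [pyBitLen]; simp

theorem pyBitLen_one : pyBitLen 1 = 1 := by
  rw [pyBitLen]
  simp [pyBitLen_zero]

theorem ldiff_pred_ne_zero (m : Nat) (hm : m ≠ 0) : Nat.ldiff m (m - 1) ≠ 0 := by
  intro h0
  have hb : ∀ i, m.testBit i = (m &&& (m - 1)).testBit i := by
    intro i
    have := congrArg (fun x => Nat.testBit x i) h0
    simp only [Nat.testBit_ldiff, Nat.zero_testBit] at this
    rw [Nat.testBit_land]
    cases hmi : m.testBit i <;> simp [hmi] at this ⊢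
    exact this
  have := Nat.eq_of_testBit_eq hb
  have h2 : m &&& (m - 1) ≤ m - 1 := Nat.and_le_right
  omega

theorem ldiff_double (m : Nat) :
    Nat.ldiff (2 * m) (2 * m - 1) = 2 * Nat.ldiff m (m - 1) := by
  by_cases hm : m = 0
  · subst hm
    have h00 : Nat.ldiff 0 0 = 0 := by
      apply Nat.eq_of_testBit_eq
      intro i
      simp [Nat.testBit_ldiff]
    norm_num [h00]
  apply Nat.eq_of_testBit_eq
  intro i
  have h1 : 2 * m - 1 = 2 * (m - 1) + 1 := by omega
  cases i with
  | zero =>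
    rw [Nat.testBit_ldiff, tb0_even, tb0_even]
    simp
  | succ j =>
    rw [Nat.testBit_ldiff, h1, tbs_odd, tbs_even, tbs_even, Nat.testBit_ldiff]

theorem land_pred_double (m : Nat) :
    (2 * m) &&& (2 * m - 1) = 2 * (m &&& (m - 1)) := by
  by_cases hm : m = 0
  · subst hm
    apply Nat.eq_of_testBit_eq
    intro i
    simp
  apply Nat.eq_of_testBit_eq
  intro i
  have h1 : 2 * m - 1 = 2 * (m - 1) + 1 := by omega
  cases i with
  | zero =>
    rw [Nat.testBit_land, tb0_even, tb0_even]
    simp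
  | succ j =>
    rw [Nat.testBit_land, h1, tbs_odd, tbs_even, tbs_even, Nat.testBit_land]

theorem natA_double (m : Nat) : natA (2 * m) = (natA m).map (· + 1) := by
  induction m using Nat.strong_induction_on with
  | _ m ih =>
    by_cases hm : m = 0
    · subst hm; rw [natA, natA]; simp
    · conv_lhs => rw [natA]
      conv_rhs => rw [natA]
      have h2 : ¬ (2 * m = 0) := by omega
      rw [dif_neg h2, dif_neg hm, List.map_cons]
      congr 1
      · rw [ldiff_double m, pyBitLen_even _ (ldiff_pred_ne_zero m hm)]
        push_cast; ring
      · rw [land_pred_double m]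
        exact ih (m &&& (m - 1)) (Nat.lt_of_le_of_lt Nat.and_le_right (by omega))

theorem ldiff_succ_double (m : Nat) : Nat.ldiff (2 * m + 1) (2 * m) = 1 := by
  apply Nat.eq_of_testBit_eq
  intro i
  cases i with
  | zero =>
    rw [Nat.testBit_ldiff, tb0_odd, tb0_even]
    decide
  | succ j =>
    rw [Nat.testBit_ldiff, tbs_odd, tbs_even, Nat.testBit_succ]
    simp

theorem land_succ_double (m : Nat) : (2 * m + 1) &&& (2 * m) = 2 * m := by
  apply Nat.eq_of_testBit_eq
  intro i
  cases i with
  | zero =>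
    rw [Nat.testBit_land, tb0_odd, tb0_even]
    simp
  | succ j =>
    rw [Nat.testBit_land, tbs_odd, tbs_even]
    simp

theorem natA_odd (m : Nat) : natA (2 * m + 1) = 1 :: natA (2 * m) := by
  rw [natA, dif_neg (by omega : ¬ 2 * m + 1 = 0)]
  have h2 : 2 * m + 1 - 1 = 2 * m := by omega
  rw [h2, ldiff_succ_double, land_succ_double, pyBitLen_one]
  simp

theorem natB_double (m : Nat) : natB (2 * m) = (natB m).map (· + 1) := by
  by_cases hm : m = 0
  · subst hm
    show natB 0 = (natB 0).map (· + 1)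
    unfold natB
    rw [pyBitLen_zero]
    rfl
  · unfold natB
    rw [pyBitLen_even m hm, List.range_succ_eq_map,
        List.filterMap_cons_none (by simp),
        List.filterMap_map, List.map_filterMap]
    apply List.filterMap_congr
    intro i _
    simp only [Function.comp_apply, tbs_even]
    by_cases h : m.testBit i <;> simp [h]

theorem natB_odd (m : Nat) : natB (2 * m + 1) = 1 :: (natB m).map (· + 1) := by
  unfold natB
  rw [pyBitLen_odd m, List.range_succ_eq_map,
      List.filterMap_cons_some (b := (1:Int)) (by simp),
      List.filterMap_map, List.map_filterMap]
  congr 1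
  apply List.filterMap_congr
  intro i _
  simp only [Function.comp_apply, tbs_odd]
  by_cases h : m.testBit i <;> simp [h]

theorem natAB (m : Nat) : natA m = natB m := by
  induction m using Nat.strong_induction_on with
  | _ m ih =>
    by_cases hm : m = 0
    · subst hm
      rw [natA]
      unfold natB
      rw [pyBitLen_zero]
      simp
    · rcases Nat.even_or_odd m with ⟨q, hq⟩ | ⟨q, hq⟩
      · have hq' : m = 2 * q := by omega
        rw [hq', natA_double, natB_double, ih q (by omega)]
      · rw [hq, natA_odd, natA_double, natB_odd, ih q (by omega)]

theorem list_cards_ofNat (m : Nat) : list_cards (Int.ofNat m) = natA m := by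
  induction m using Nat.strong_induction_on with
  | _ m ih =>
    by_cases hm : m = 0
    · subst hm
      rw [list_cards, natA, dif_neg (by decide : ¬ (0:Int) < Int.ofNat 0)]
      rfl
    · obtain ⟨k, rfl⟩ : ∃ k, m = k + 1 := ⟨m - 1, by omega⟩
      have hpos : (0:Int) < Int.ofNat (k + 1) := Int.natCast_pos.mpr (Nat.succ_pos k)
      rw [list_cards, dif_pos hpos, natA, dif_neg hm]
      have hlsb : Int.land (Int.ofNat (k + 1)) (-(Int.ofNat (k + 1)))
          = Int.ofNat (Nat.ldiff (k + 1) k) := rfl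
      have hpred : (Int.ofNat (k + 1)) - 1 = Int.ofNat k := by
        simp only [Int.ofNat_eq_natCast]; omega
      have hland : Int.land (Int.ofNat (k + 1)) ((Int.ofNat (k + 1)) - 1)
          = Int.ofNat ((k + 1) &&& k) := by rw [hpred]; rfl
      show (((pyBitLen (Int.land (Int.ofNat (k + 1)) (-(Int.ofNat (k + 1)))).natAbs : Nat) : Int) - 1 + 1)
            :: list_cards (Int.land (Int.ofNat (k + 1)) ((Int.ofNat (k + 1)) - 1))
          = (pyBitLen (Nat.ldiff (k + 1) (k + 1 - 1)) : Int) :: natA ((k + 1) &&& (k + 1 - 1))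
      rw [hlsb, hland, ih ((k + 1) &&& k) (Nat.lt_of_le_of_lt Nat.and_le_right (by omega))]
      have hk : (k + 1) - 1 = k := rfl
      rw [hk]
      congr 1
      have hA : (Int.ofNat (Nat.ldiff (k + 1) k)).natAbs = Nat.ldiff (k + 1) k := rfl
      rw [hA]; ring

theorem list_cards_alt_ofNat (m : Nat) : list_cards_alt (Int.ofNat m) = natB m := by
  unfold list_cards_alt natB
  have hA : (Int.ofNat m).natAbs = m := rfl
  rw [hA]
  apply List.filterMap_congr
  intro i _
  have hsh : (Int.ofNat m) >>> i = Int.ofNat (m >>> i) := rfl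
  have hand : Int.land (Int.ofNat (m >>> i)) 1 = Int.ofNat ((m >>> i) &&& 1) := rfl
  rw [hsh, hand]
  have hiff : (Int.ofNat ((m >>> i) &&& 1) ≠ 0) ↔ (m.testBit i = true) := by
    show _ ↔ ((1 &&& m >>> i) != 0) = true
    rw [Nat.and_comm 1 (m >>> i), Nat.and_one_is_mod]
    simp only [Int.ofNat_eq_natCast, ne_eq, Nat.cast_eq_zero, bne_iff_ne]
  by_cases h : m.testBit i
  · rw [if_pos (hiff.mpr h), if_pos h]
  · rw [if_neg (fun hc => h (hiff.mp hc)), if_neg (by simp [h])]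

-- ===== VERDICT (by name: the statement is the Claim_ definition above) =====
theorem list_cards_spec : Claim_equal_list_cards := by
  intro mask _ hpre
  unfold Spec_list_cards
  obtain ⟨m, rfl⟩ : ∃ m : Nat, mask = Int.ofNat m :=
    ⟨mask.toNat, by
      have h0 : (0:Int) ≤ mask := hpre
      rw [Int.ofNat_eq_natCast]
      omega⟩
  rw [list_cards_ofNat, list_cards_alt_ofNat, natAB]
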